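-- pv_equiv track=rewrite | github.com/fang-xiaoyu/CS61A | guer/guer01.py | mario_number
-- ===== SOURCE A (Python) =====
-- def mario_number(level):
--     """Return the number of ways that Mario can perform a sequence of steps
--     or jumps to reach the end of the level without ever landing in a Piranha
--     plant. Assume that every level begins and ends with a space.
--     >>> mario_number(' P P ') # jump, jump
--     1
--     >>> mario_number(' P P  ') # jump, jump, step
--     1
--     >>> mario_number('  P P ') # step, jump, jump
--     1
--     >>> mario_number('   P P ') # step, step, jump, jump or jump, jump, jump
--     2
--     >>> mario_number(' P PP ') # Mario cannot jump two plants
--     0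
--     >>> mario_number('    ') # step, jump ; jump, step ; step, step, step
--     3
--     >>> mario_number('    P    ')
--     9
--     >>> mario_number('   P    P P   P  P P    P     P ')
--     180
--     """
--     if len(level) == 0:
--         return 1
--     if len(level) == 1:
--         return 1
--     if len(level) == 2:
--         return 1
--     if level[1] == ' ':
--         if level[2] == ' ':
--             return mario_number(level[1:]) + mario_number(level[2:])
--         else:
--             return mario_number(level[1:])
--     else:
--         if level[2] == ' ':
--             return mario_number(level[2:])
--         else:
--             return 0
-- ===== SOURCE B (Python) =====
-- def mario_number(level):
--     # Forward linear DP: count paths reaching each position left-to-right,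
--     # keeping only two running counters (paths to current pos, paths to next pos).
--     if len(level) <= 2:
--         return 1
--     cur, nxt = 1, 0
--     for b, c in zip(level[1:], level[2:]):
--         cur, nxt = nxt + (cur if b == ' ' else 0), (cur if c == ' ' else 0)
--     return cur + nxt
-- ===== Notes on version B (the rewrite author's own statement) =====
-- stated objective: alternative
-- what changed: Replaced A's branching recursion over string suffixes (exponential on all-space worst cases) by a single left-to-right pass keeping two running path counters (paths reaching the current and the next position), a linear forward DP.
import Mathlib
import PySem

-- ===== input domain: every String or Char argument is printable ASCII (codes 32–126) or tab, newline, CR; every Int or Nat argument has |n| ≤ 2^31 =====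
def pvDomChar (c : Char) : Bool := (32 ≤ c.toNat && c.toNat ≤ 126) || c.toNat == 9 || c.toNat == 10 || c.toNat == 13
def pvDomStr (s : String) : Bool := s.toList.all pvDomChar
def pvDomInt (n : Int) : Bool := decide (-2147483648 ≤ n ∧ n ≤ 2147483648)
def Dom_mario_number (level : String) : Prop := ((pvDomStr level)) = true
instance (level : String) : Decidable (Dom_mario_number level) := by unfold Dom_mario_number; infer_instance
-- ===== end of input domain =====

-- B replaces A's branching suffix recursion by a single left-to-right pass keeping two
-- running path counters (a linear forward DP); objective: alternative algorithm.

-- ===== PORT A =====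
-- A's recursion on the string, transliterated over List Char: level[1:] / level[2:]
-- are the structural tails, level[1] / level[2] the pattern-bound chars (always in
-- range where A reads them, since len ≥ 3 in those branches).
def marioA : List Char → Int
  | [] => 1
  | [_] => 1
  | [_, _] => 1
  | _ :: b :: c :: rest =>
    if b = ' ' then
      if c = ' ' then marioA (b :: c :: rest) + marioA (c :: rest)
      else marioA (b :: c :: rest)
    else
      if c = ' ' then marioA (c :: rest)
      else 0

def mario_number (level : String) : Int := marioA level.toList

-- ===== PORT B =====
-- Source B's loop body: (cur, nxt) updated from the pair (level[i+1], level[i+2]).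
def marioStep (p : Int × Int) (bc : Char × Char) : Int × Int :=
  (p.2 + (if bc.1 = ' ' then p.1 else 0), if bc.2 = ' ' then p.1 else 0)

-- zip(level[1:], level[2:]) = List.zip (drop 1) (drop 2)  (slices with nonneg start are drops)
def mario_number_alt (level : String) : Int :=
  let s := level.toList
  if s.length ≤ 2 then 1
  else
    let p := (List.zip (s.drop 1) (s.drop 2)).foldl marioStep (1, 0)
    p.1 + p.2

-- ===== PRECONDITION & SPEC =====
def Spec_mario_number (level : String) (out : Int) : Prop := out = mario_number_alt level
instance (level : String) (out : Int) : Decidable (Spec_mario_number level out) := by unfold Spec_mario_number; infer_instance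

-- ===== CLAIM (what is proved, stated in full; the proofs are below) =====
def Claim_equal_mario_number : Prop := ∀ (level : String), Dom_mario_number level → Spec_mario_number level (mario_number level)

-- ===== LEMMAS AND PROOFS =====

-- Loop invariant: starting B's fold from (cur, nxt) on the windows of s computes
-- cur·(A's count for s) + nxt·(A's count for s.tail).
theorem mario_fold : ∀ (s : List Char), 2 ≤ s.length → ∀ (cur nxt : Int),
    (((List.zip (s.drop 1) (s.drop 2)).foldl marioStep (cur, nxt)).1 +
      ((List.zip (s.drop 1) (s.drop 2)).foldl marioStep (cur, nxt)).2)
      = cur * marioA s + nxt * marioA (s.drop 1)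
  | [], h => by simp at h
  | [_], h => by simp at h
  | [_, _], _ => by intro cur nxt; simp [marioA]
  | a :: b :: c :: rest, _ => by
    intro cur nxt
    have ih := mario_fold (b :: c :: rest) (by simp)
    have hz : List.zip ((a :: b :: c :: rest).drop 1) ((a :: b :: c :: rest).drop 2)
        = (b, c) :: List.zip ((b :: c :: rest).drop 1) ((b :: c :: rest).drop 2) := by
      simp [List.zip]
    rw [hz, List.foldl_cons, ih]
    simp only [marioStep, marioA, List.drop_succ_cons, List.drop_zero]
    split_ifs <;> ring
termination_by s => s.length

theorem mario_number_spec : Claim_equal_mario_number := by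
  intro level _
  unfold Spec_mario_number mario_number mario_number_alt
  set s := level.toList with hs
  by_cases h : s.length ≤ 2
  · simp only [h, if_true]
    match s, h with
    | [], _ => rfl
    | [_], _ => rfl
    | [_, _], _ => rfl
  · simp only [h, if_false]
    have h2 : 2 ≤ s.length := by omega
    have := mario_fold s h2 1 0
    simp only [one_mul, zero_mul, add_zero] at this
    simpa using this.symm
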